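-- pv_equiv track=rewrite | github.com/Campos032/SCRIPTSPYTHON | Paradaigmas_De_Programação/Programação_Baseada_Em_Restrições.py | encontrar_horario_disponivel
-- ===== SOURCE A (Python) =====
-- def encontrar_horario_disponivel(disponibilidades):
--     # Define um conjunto com horários disponíveis da primeira pessoa
--     horarios_comuns = set(disponibilidades[0])
--
--     # Percorre a lista a partir da segunda pessoa
--     for disponibilidade in disponibilidades[1:]:
--         # Resulta em um novo conjunto contendo apenas os elementos que estão presentes em ambos os conjuntos
--         horarios_comuns = horarios_comuns.intersection(disponibilidade)
--
--     # Verifica se o conjunto está vazio ou não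
--     if horarios_comuns:
--         return horarios_comuns
--     else:
--         return None
-- ===== SOURCE B (Python) =====
-- def encontrar_horario_disponivel(disponibilidades):
--     # Count, per slot, in how many people's lists it appears (each person's
--     # list deduplicated), then keep the slots counted in all n lists.
--     n = len(disponibilidades)
--     contagem = {}
--     for pessoa in disponibilidades:
--         for h in set(pessoa):
--             contagem[h] = contagem.get(h, 0) + 1
--     comuns = {h for h, c in contagem.items() if c == n}
--     return comuns if comuns else None
-- ===== Notes on version B (the rewrite author's own statement) =====
-- stated objective: alternative
-- what changed: Replaces progressive set intersection with a one-pass occurrence counter over all lists (each list deduplicated), keeping the slots whose count equals the number of people.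
import Mathlib
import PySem

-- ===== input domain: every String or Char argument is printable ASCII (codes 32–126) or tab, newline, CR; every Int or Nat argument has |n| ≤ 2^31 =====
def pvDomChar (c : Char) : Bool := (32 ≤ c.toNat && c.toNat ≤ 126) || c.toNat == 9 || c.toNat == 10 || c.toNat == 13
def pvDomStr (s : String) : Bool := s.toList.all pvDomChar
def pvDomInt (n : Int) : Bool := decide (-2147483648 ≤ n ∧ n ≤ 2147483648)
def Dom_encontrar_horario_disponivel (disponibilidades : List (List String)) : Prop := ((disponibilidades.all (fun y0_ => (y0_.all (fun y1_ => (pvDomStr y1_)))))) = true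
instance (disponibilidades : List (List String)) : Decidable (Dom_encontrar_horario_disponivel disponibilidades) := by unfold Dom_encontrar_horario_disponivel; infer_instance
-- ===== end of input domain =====

-- B replaces A's progressive set intersection with a one-pass occurrence counter
-- (alternative decomposition, same cost). Equivalence is about the return value.

-- ===== PORT A =====
def encontrar_horario_disponivel (disponibilidades : List (List String)) : Option (List String) :=
  match PySem.List.pyGet? disponibilidades 0 with
  | none => none   -- Python raises IndexError on disponibilidades[0]; excluded by Pre_
  | some first =>
    let horarios_comuns : PySem.Set String :=
      (PySem.List.slice disponibilidades (some 1) none).foldl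
        (fun hc disp => PySem.Set.inter hc disp) (PySem.Set.ofList first)
    if horarios_comuns.isEmpty then none else some horarios_comuns

-- ===== PORT B =====
def encontrar_horario_disponivel_alt (disponibilidades : List (List String)) : Option (List String) :=
  let n : Int := disponibilidades.length
  let contagem : PySem.Dict String Int :=
    disponibilidades.foldl
      (fun c pessoa =>
        (PySem.Set.ofList pessoa).foldl (fun c h => c.insert h (c.getD h 0 + 1)) c)
      PySem.Dict.empty
  let comuns : PySem.Set String :=
    PySem.Set.ofList ((contagem.items.filter (fun p => p.2 == n)).map Prod.fst)
  if comuns.isEmpty then none else some comuns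

-- ===== PRECONDITION & SPEC =====
-- Pre_ excludes only the empty list, on which Python A raises IndexError.
def Pre_encontrar_horario_disponivel (disponibilidades : List (List String)) : Prop :=
  disponibilidades ≠ []
instance (disponibilidades : List (List String)) : Decidable (Pre_encontrar_horario_disponivel disponibilidades) := by unfold Pre_encontrar_horario_disponivel; infer_instance
def pvWitness_encontrar_horario_disponivel : List (List String) := [["09:00", "10:00"], ["10:00"]]

def Spec_encontrar_horario_disponivel (disponibilidades : List (List String)) (out : Option (List String)) : Prop := out = encontrar_horario_disponivel_alt disponibilidades
instance (disponibilidades : List (List String)) (out : Option (List String)) : Decidable (Spec_encontrar_horario_disponivel disponibilidades out) := by unfold Spec_encontrar_horario_disponivel; infer_instance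

-- ===== CLAIM (what is proved, stated in full; the proofs are below) =====
def Claim_equal_encontrar_horario_disponivel : Prop := ∀ (disponibilidades : List (List String)), Dom_encontrar_horario_disponivel disponibilidades → Pre_encontrar_horario_disponivel disponibilidades → Spec_encontrar_horario_disponivel disponibilidades (encontrar_horario_disponivel disponibilidades)

-- ===== LEMMAS AND PROOFS =====

lemma foldA (rest : List (List String)) (s : List String) :
    rest.foldl (fun hc disp => PySem.Set.inter hc disp) s
      = s.filter (fun x => rest.all (fun l => l.contains x)) := by
  induction rest generalizing s with
  | nil => simp
  | cons l rest ih =>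
    show rest.foldl _ (PySem.Set.inter s l) = _
    rw [ih]
    show (s.filter (fun x => l.contains x)).filter _ = _
    rw [List.filter_filter]
    simp [Bool.and_comm]

lemma foldB (d : List (List String)) (c : PySem.Dict String Int) :
    d.foldl (fun c pessoa => (PySem.Set.ofList pessoa).foldl (fun c h => c.insert h (c.getD h 0 + 1)) c) c
      = (d.flatMap (fun l => PySem.Set.ofList l)).foldl (fun c h => c.insert h (c.getD h 0 + 1)) c := by
  induction d generalizing c with
  | nil => simp
  | cons l d ih => simp [List.foldl_append, ih]

lemma count_ofList (l : List String) (k : String) :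
    (PySem.Set.ofList l).count k = if l.contains k then 1 else 0 := by
  by_cases h : k ∈ l
  · rw [if_pos (by simpa using h)]
    exact List.count_eq_one_of_mem (PySem.Set.nodup_ofList l) ((PySem.Set.mem_ofList l k).2 h)
  · rw [if_neg (by simpa using h)]
    exact List.count_eq_zero_of_not_mem (fun hm => h ((PySem.Set.mem_ofList l k).1 hm))

lemma count_flat (d : List (List String)) (k : String) :
    (d.flatMap (fun l => PySem.Set.ofList l)).count k = d.countP (fun l => l.contains k) := by
  induction d with
  | nil => simp
  | cons l d ih =>
    simp [List.count_append, ih, count_ofList, List.countP_cons]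
    split <;> omega

lemma bothLists (first : List String) (rest : List (List String)) :
    PySem.Set.ofList
        (((PySem.Dict.counter (((first :: rest).flatMap (fun l => PySem.Set.ofList l)))).items.filter
            (fun p => p.2 == ((first :: rest).length : Int))).map Prod.fst)
      = (PySem.Set.ofList first).filter (fun x => rest.all (fun l => l.contains x)) := by
  rw [PySem.Dict.items_counter]
  rw [List.filter_map, List.map_map]
  simp only [Function.comp_def, List.map_id']
  have hflat : ((first :: rest).flatMap (fun l => PySem.Set.ofList l))
      = PySem.Set.ofList first ++ rest.flatMap (fun l => PySem.Set.ofList l) := by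
    simp
  have hnd : (List.filter
      (fun x => ((List.count x ((first :: rest).flatMap (fun l => PySem.Set.ofList l)) : Int)) == ((first :: rest).length : Int))
      (PySem.Set.ofList ((first :: rest).flatMap (fun l => PySem.Set.ofList l)))).Nodup :=
    List.Nodup.filter _ (PySem.Set.nodup_ofList _)
  rw [PySem.Set.ofList_eq_self_of_nodup _ hnd]
  rw [hflat, PySem.Set.ofList_append, PySem.Set.ofList_ofList,
    PySem.Set.update_eq_append_filter, List.filter_append]
  have h2 : (((PySem.Set.ofList (rest.flatMap (fun l => PySem.Set.ofList l))).filter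
        (fun y => !(PySem.Set.contains (PySem.Set.ofList first) y))).filter
        (fun p => ((((PySem.Set.ofList first ++ rest.flatMap (fun l => PySem.Set.ofList l)).count p : Int)) == ((first :: rest).length : Int)))) = [] := by
    rw [List.filter_eq_nil_iff]
    intro y hy
    have hyn : y ∉ first := by
      have := (List.mem_filter.1 hy).2
      simpa [PySem.Set.contains_iff, PySem.Set.mem_ofList] using this
    have hcnt : (PySem.Set.ofList first ++ rest.flatMap (fun l => PySem.Set.ofList l)).count y < (first :: rest).length := by
      rw [← hflat, count_flat, List.countP_cons]
      simp only [List.contains_eq_mem]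
      have hle := List.countP_le_length (l := rest) (p := fun l => decide (y ∈ l))
      simp [hyn]
      omega
    simp only [beq_iff_eq]
    intro he
    have : (PySem.Set.ofList first ++ rest.flatMap (fun l => PySem.Set.ofList l)).count y = (first :: rest).length := by
      exact_mod_cast he
    omega
  rw [h2, List.append_nil]
  apply List.filter_congr
  intro x hx
  have hxf : x ∈ first := (PySem.Set.mem_ofList first x).1 hx
  have hc : List.contains first x = true := by simpa using hxf
  rw [← hflat, count_flat]
  simp only [List.countP_cons, hc, if_pos, List.length_cons]
  by_cases hall : rest.all (fun l => l.contains x) = true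
  · have hlen := (List.countP_eq_length (p := fun l => l.contains x) (l := rest)).2
      (by intro a ha; exact (List.all_eq_true.1 hall) a ha)
    simp only [List.contains_eq_mem] at hlen
    simp [hlen]
    intro a ha
    simpa using (List.all_eq_true.1 hall) a ha
  · have hne : rest.countP (fun l => l.contains x) ≠ rest.length := by
      intro he
      exact hall (List.all_eq_true.2 fun a ha => (List.countP_eq_length (p := fun l => l.contains x)).1 he a ha)
    have hle := List.countP_le_length (l := rest) (p := fun l => l.contains x)
    simp only [hall]
    rw [beq_eq_false_iff_ne]
    intro he
    have : rest.countP (fun l => l.contains x) + 1 = rest.length + 1 := by exact_mod_cast he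
    exact hne (by omega)

theorem pv_main : ∀ (d : List (List String)), d ≠ [] →
    encontrar_horario_disponivel d = encontrar_horario_disponivel_alt d := by
  intro d hpre
  match d with
  | [] => exact absurd rfl hpre
  | first :: rest =>
    simp only [encontrar_horario_disponivel, encontrar_horario_disponivel_alt]
    rw [foldB, PySem.Dict.foldl_insert_getD_add_one_eq_counter]
    rw [bothLists first rest]
    rw [show PySem.List.pyGet? (first :: rest) 0 = some first by simp [PySem.List.pyGet?, PySem.List.pyIdx?]]
    rw [PySem.List.slice_from_one]
    simp only [List.tail_cons]
    rw [foldA]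

-- ===== VERDICT (by name: the statement is the Claim_ definition above) =====
theorem encontrar_horario_disponivel_spec : Claim_equal_encontrar_horario_disponivel := by
  intro d _ hpre
  exact pv_main d hpre
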